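-- pv_equiv track=rewrite | github.com/amitkhotele/GeeksforGeeks-POTD | August 2025 Solutions/Aug-13.py | minSoldiers
-- ===== SOURCE A (Python) =====
-- import math
--
-- def minSoldiers(arr, k):
--     n = len(arr)
--     lucky_count = 0
--     add_list = []
--
--     for soldiers in arr:
--         if soldiers % k == 0:
--             lucky_count += 1
--         else:
--             add_list.append(k - (soldiers % k))
--
--     # Already enough lucky troops
--     if lucky_count >= math.ceil(n / 2):
--         return 0
--
--     # Sort required additions
--     add_list.sort()
--
--     # Number of troops we still need to make lucky
--     required = math.ceil(n / 2) - lucky_count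
--
--     # Sum smallest 'required' additions
--     return sum(add_list[:required])
-- ===== SOURCE B (Python) =====
-- import math
--
-- def minSoldiers(arr, k):
--     n = len(arr)
--     need = math.ceil(n / 2)
--     costs = [(-x) % k for x in arr]
--     if need >= n:
--         return sum(costs)
--     # binary search the smallest threshold t with at least `need` costs <= t
--     lo, hi = 0, k - 1
--     while lo < hi:
--         mid = (lo + hi) // 2
--         if sum(1 for c in costs if c <= mid) >= need:
--             hi = mid
--         else:
--             lo = mid + 1
--     t = lo
--     below = [c for c in costs if c < t]
--     return sum(below) + t * (need - len(below))
-- ===== Notes on version B (the rewrite author's own statement) =====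
-- stated objective: alternative
-- what changed: Replaces A's lucky-count/branch/sort-and-slice pipeline by one uniform per-element cost (-x) % k and a value-space binary search for the cut-off threshold, summing the ceil(n/2) smallest costs without sorting.
-- outside the precondition, e.g. on minSoldiers([0, 1], -3): A returns 0, B returns -1; on minSoldiers([2], -3): A returns -2, B returns -2; on minSoldiers([1], 0): A raises ZeroDivisionError, B raises ZeroDivisionError
import Mathlib
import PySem

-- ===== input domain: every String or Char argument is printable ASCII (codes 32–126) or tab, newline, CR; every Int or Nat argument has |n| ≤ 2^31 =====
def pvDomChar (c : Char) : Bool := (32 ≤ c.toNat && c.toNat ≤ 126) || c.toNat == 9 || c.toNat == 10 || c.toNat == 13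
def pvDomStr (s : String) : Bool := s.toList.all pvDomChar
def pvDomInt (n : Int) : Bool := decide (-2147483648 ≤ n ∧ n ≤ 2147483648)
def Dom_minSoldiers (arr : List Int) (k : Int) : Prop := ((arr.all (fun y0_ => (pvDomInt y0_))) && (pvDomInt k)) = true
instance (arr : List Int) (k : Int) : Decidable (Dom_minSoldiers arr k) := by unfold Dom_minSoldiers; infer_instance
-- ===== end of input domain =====

-- B replaces A's lucky-count/branch/sort-and-slice pipeline by one uniform cost (-x) % k per element
-- and a quickselect-style partition summing the ceil(n/2) smallest costs (alternative algorithm, no sort).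


-- ===== PORT A =====
def minSoldiers (arr : List Int) (k : Int) : Int :=
  let n : Nat := arr.length
  -- the for-loop over arr, accumulating (lucky_count, add_list)
  let st := arr.foldl (fun (s : Int × List Int) x =>
      if PySem.Int.mod x k = 0 then (s.1 + 1, s.2)
      else (s.1, s.2 ++ [k - PySem.Int.mod x k])) (0, [])
  -- math.ceil(n / 2) with n = len(arr) ≥ 0: exact as (n + 1) / 2 (the float n/2 is exact at these sizes)
  let need : Int := ((n + 1) / 2 : Nat)
  if need ≤ st.1 then 0
  else
    let sortedAdd := PySem.List.sorted st.2 (fun x => x) false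
    let required := need - st.1
    (PySem.List.slice sortedAdd none (some required)).sum

-- ===== PORT B =====
-- binary search: smallest t in [lo, hi] with at least `need` costs <= t (the while loop)
def bsearchT (costs : List Int) (need : Int) (lo hi : Int) : Int :=
  if h : lo < hi then
    let mid := PySem.Int.floordiv (lo + hi) 2
    if need ≤ (costs.countP (fun c => decide (c ≤ mid)) : Int)
    then bsearchT costs need lo mid
    else bsearchT costs need (mid + 1) hi
  else lo
termination_by (hi - lo).toNat
decreasing_by
  · have := PySem.Int.floordiv_two_mid_bounds (le_of_lt h)
    have hlt : PySem.Int.floordiv (lo + hi) 2 < hi :=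
      (PySem.Int.floordiv_lt_iff_lt_mul (by omega)).mpr (by omega)
    omega
  · have := PySem.Int.floordiv_two_mid_bounds (le_of_lt h)
    omega

def minSoldiers_alt (arr : List Int) (k : Int) : Int :=
  let n : Nat := arr.length
  -- math.ceil(n / 2): exact as (n + 1) / 2 for n = len(arr) >= 0
  let need : Int := ((n + 1) / 2 : Nat)
  let costs := arr.map (fun x => PySem.Int.mod (-x) k)
  if (n : Int) ≤ need then costs.sum
  else
    let t := bsearchT costs need 0 (k - 1)
    let below := costs.filter (fun c => decide (c < t))
    below.sum + t * (need - below.length)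

-- ===== PRECONDITION & SPEC =====
-- Pre_ excludes k = 0, where A (and B) raise ZeroDivisionError, and k < 0, which is outside the
-- task's natural domain (the "additions" k - soldiers % k are negative there, so A's early-return
-- corner is an accident); A still returns a value for k < 0 — see the cited excluded example.
def Pre_minSoldiers (arr : List Int) (k : Int) : Prop := 0 < k
instance (arr : List Int) (k : Int) : Decidable (Pre_minSoldiers arr k) := by unfold Pre_minSoldiers; infer_instance
def pvWitness_minSoldiers : List Int × Int := ([3, 1, 4, 9], 3)

def Spec_minSoldiers (arr : List Int) (k : Int) (out : Int) : Prop := out = minSoldiers_alt arr k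
instance (arr : List Int) (k : Int) (out : Int) : Decidable (Spec_minSoldiers arr k out) := by unfold Spec_minSoldiers; infer_instance

-- ===== CLAIM (what is proved, stated in full; the proofs are below) =====
def Claim_equal_minSoldiers : Prop := ∀ (arr : List Int) (k : Int), Dom_minSoldiers arr k → Pre_minSoldiers arr k → Spec_minSoldiers arr k (minSoldiers arr k)

-- ===== LEMMAS AND PROOFS =====

-- sorted(xs) splits at a pivot p into the part below p, the copies of p, and the part above p
theorem sorted_trichotomy (xs : List Int) (p : Int) :
    PySem.List.sorted xs (fun x => x) false
    = PySem.List.sorted (xs.filter (fun x => decide (x < p))) (fun x => x) false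
      ++ List.replicate (xs.count p) p
      ++ PySem.List.sorted (xs.filter (fun x => decide (p < x))) (fun x => x) false := by
  apply PySem.List.sorted_id_eq_of_perm_of_pairwise
  · have h1 : (xs.filter (fun x => decide (x < p)) ++ xs.filter (fun x => !decide (x < p))).Perm xs :=
      List.filter_append_perm _ xs
    have h2 : ((xs.filter (fun x => !decide (x < p))).filter (fun x => x == p)
        ++ (xs.filter (fun x => !decide (x < p))).filter (fun x => !(x == p))).Perm
        (xs.filter (fun x => !decide (x < p))) :=
      List.filter_append_perm _ _
    have e1 : (xs.filter (fun x => !decide (x < p))).filter (fun x => x == p)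
        = xs.filter (fun x => x == p) := by
      rw [List.filter_filter]
      apply List.filter_congr
      intro x _
      rcases lt_trichotomy x p with h | h | h <;> simp [h] <;> omega
    have e2 : (xs.filter (fun x => !decide (x < p))).filter (fun x => !(x == p))
        = xs.filter (fun x => decide (p < x)) := by
      rw [List.filter_filter]
      apply List.filter_congr
      intro x _
      rcases lt_trichotomy x p with h | h | h <;> simp [h] <;> omega
    have e3 : xs.filter (fun x => x == p) = List.replicate (xs.count p) p := by
      rw [List.eq_replicate_iff]
      refine ⟨by rw [List.count, List.countP_eq_length_filter], ?_⟩
      intro b hb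
      simpa using List.of_mem_filter hb
    rw [e1, e3] at h2
    rw [e2] at h2
    refine List.Perm.trans ?_ h1
    rw [List.append_assoc]
    refine List.Perm.append (PySem.List.sorted_perm _ _ _) ?_
    refine List.Perm.trans ?_ h2
    exact List.Perm.append_left _ (PySem.List.sorted_perm _ _ _)
  · rw [List.append_assoc, List.pairwise_append]
    refine ⟨PySem.List.sorted_pairwise _ _, ?_, ?_⟩
    · rw [List.pairwise_append]
      refine ⟨List.pairwise_replicate.mpr (Or.inr le_rfl), PySem.List.sorted_pairwise _ _, ?_⟩
      intro a ha b hb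
      have ha' : a = p := List.eq_of_mem_replicate ha
      have hb' : p < b := by
        have := (PySem.List.mem_sorted _ _ _ _).mp hb
        simpa using List.of_mem_filter this
      omega
    · intro a ha b hb
      have ha' : a < p := by
        have := (PySem.List.mem_sorted _ _ _ _).mp ha
        simpa using List.of_mem_filter this
      rcases List.mem_append.mp hb with hb | hb
      · have := List.eq_of_mem_replicate hb; omega
      · have hb' : p < b := by
          have := (PySem.List.mem_sorted _ _ _ _).mp hb
          simpa using List.of_mem_filter this
        omega

-- splitting a <=-count at t into the strict part and the copies of t
theorem countP_le_split (l : List Int) (t : Int) :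
    l.countP (fun c => decide (c ≤ t)) = l.countP (fun c => decide (c < t)) + l.count t := by
  induction l with
  | nil => rfl
  | cons a tl ih =>
      simp only [List.countP_cons, List.count_cons, ih, beq_iff_eq, decide_eq_true_eq]
      split_ifs <;> omega

-- what the binary search returns: the least threshold t with need or more costs <= t
theorem bsearchT_spec : ∀ (costs : List Int) (need lo hi : Int),
    lo ≤ hi →
    need ≤ (costs.countP (fun c => decide (c ≤ hi)) : Int) →
    (∀ m : Int, m < lo → (costs.countP (fun c => decide (c ≤ m)) : Int) < need) →
    lo ≤ bsearchT costs need lo hi ∧ bsearchT costs need lo hi ≤ hi ∧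
      need ≤ (costs.countP (fun c => decide (c ≤ bsearchT costs need lo hi)) : Int) ∧
      (∀ m : Int, m < bsearchT costs need lo hi →
        (costs.countP (fun c => decide (c ≤ m)) : Int) < need)
  | costs, need, lo, hi => fun hle hhi hlo => by
    rw [bsearchT]
    split
    · next h =>
      have hmid := PySem.Int.floordiv_two_mid_bounds (le_of_lt h)
      have hmidlt : PySem.Int.floordiv (lo + hi) 2 < hi :=
        (PySem.Int.floordiv_lt_iff_lt_mul (by omega)).mpr (by omega)
      dsimp only
      split
      · next hP =>
        have ih := bsearchT_spec costs need lo (PySem.Int.floordiv (lo + hi) 2)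
          (by omega) hP hlo
        exact ⟨ih.1, by omega, ih.2.2⟩
      · next hP =>
        have hmono : ∀ m : Int, m ≤ PySem.Int.floordiv (lo + hi) 2 →
            (costs.countP (fun c => decide (c ≤ m)) : Int) < need := by
          intro m hm
          have := List.countP_mono_left (l := costs)
            (p := fun c => decide (c ≤ m)) (q := fun c => decide (c ≤ PySem.Int.floordiv (lo + hi) 2))
            (fun x _ hx => by simp only [decide_eq_true_eq] at hx ⊢; omega)
          omega
        have ih := bsearchT_spec costs need (PySem.Int.floordiv (lo + hi) 2 + 1) hi
          (by omega) hhi (fun m hm => hmono m (by omega))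
        exact ⟨by omega, ih.2.1, ih.2.2⟩
    · next h =>
      have : lo = hi := by omega
      exact ⟨le_rfl, by omega, by rw [this] at *; exact hhi, hlo⟩
  termination_by _ _ lo hi => (hi - lo).toNat
  decreasing_by
    · omega
    · omega

-- the selected threshold turns the sum of the need smallest into a filter-and-pad formula
theorem select_sum_eq (costs : List Int) (need t : Int)
    (hneedpos : 0 < need)
    (hP : need ≤ (costs.countP (fun c => decide (c ≤ t)) : Int))
    (hmin : ∀ m : Int, m < t → (costs.countP (fun c => decide (c ≤ m)) : Int) < need) :
    (costs.filter (fun c => decide (c < t))).sum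
      + t * (need - (costs.filter (fun c => decide (c < t))).length)
    = ((PySem.List.sorted costs (fun x => x) false).take need.toNat).sum := by
  have hlen : (costs.filter (fun c => decide (c < t))).length
      = costs.countP (fun c => decide (c < t)) := List.countP_eq_length_filter.symm
  have hlt : ((costs.filter (fun c => decide (c < t))).length : Int) < need := by
    have h1 := hmin (t - 1) (by omega)
    have h2 : costs.countP (fun c => decide (c ≤ t - 1)) = costs.countP (fun c => decide (c < t)) := by
      apply List.countP_congr
      intro x _
      simp only [decide_eq_true_eq]
      omega
    omega
  have hcnt : need ≤ ((costs.filter (fun c => decide (c < t))).length : Int) + costs.count t := by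
    have := countP_le_split costs t
    omega
  rw [sorted_trichotomy costs t, List.append_assoc, List.take_append,
    List.take_of_length_le (by rw [PySem.List.length_sorted]; omega),
    List.take_append, List.take_replicate, List.sum_append, List.sum_append,
    List.sum_replicate, List.length_replicate, PySem.List.length_sorted]
  have e : min (need.toNat - (costs.filter (fun c => decide (c < t))).length) (costs.count t)
      = need.toNat - (costs.filter (fun c => decide (c < t))).length := by omega
  have e2 : need.toNat - (costs.filter (fun c => decide (c < t))).length - costs.count t = 0 := by
    omega
  rw [e, e2, (PySem.List.sorted_perm _ _ false).sum_eq]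
  simp only [List.take_zero, List.sum_nil, add_zero, nsmul_eq_mul]
  have : ((need.toNat - (costs.filter (fun c => decide (c < t))).length : Nat) : Int)
      = need - (costs.filter (fun c => decide (c < t))).length := by omega
  rw [this]
  ring

-- B computes the sum of the need smallest costs
theorem alt_eq_take (arr : List Int) (k : Int) (hk : 0 < k) :
    minSoldiers_alt arr k
    = ((PySem.List.sorted (arr.map (fun x => PySem.Int.mod (-x) k)) (fun x => x) false).take
        ((((arr.length + 1) / 2 : Nat) : Int)).toNat).sum := by
  unfold minSoldiers_alt
  dsimp only
  set costs := arr.map (fun x => PySem.Int.mod (-x) k) with hcosts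
  set need : Int := (((arr.length + 1) / 2 : Nat) : Int) with hneed
  have hclen : costs.length = arr.length := by rw [hcosts, List.length_map]
  split
  · next h =>
    rw [List.take_of_length_le (by rw [PySem.List.length_sorted]; omega)]
    exact ((PySem.List.sorted_perm costs _ false).sum_eq).symm
  · next h =>
    have hneedpos : 0 < need := by omega
    have hbounds : ∀ c ∈ costs, 0 ≤ c ∧ c < k := by
      intro c hc
      obtain ⟨x, _, hx⟩ := List.mem_map.mp hc
      rw [← hx]
      exact ⟨PySem.Int.mod_nonneg (-x) hk, PySem.Int.mod_lt (-x) hk⟩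
    have hhi : need ≤ (costs.countP (fun c => decide (c ≤ k - 1)) : Int) := by
      have : costs.countP (fun c => decide (c ≤ k - 1)) = costs.length := by
        apply List.countP_eq_length.mpr
        intro c hc
        have := hbounds c hc
        simp only [decide_eq_true_eq]
        omega
      omega
    have hlo : ∀ m : Int, m < 0 → (costs.countP (fun c => decide (c ≤ m)) : Int) < need := by
      intro m hm
      have : costs.countP (fun c => decide (c ≤ m)) = 0 := by
        apply List.countP_eq_zero.mpr
        intro c hc
        have := hbounds c hc
        simp only [decide_eq_true_eq]
        omega
      omega
    have hspec := bsearchT_spec costs need 0 (k - 1) (by omega) hhi hlo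
    exact select_sum_eq costs need (bsearchT costs need 0 (k - 1)) hneedpos hspec.2.2.1 hspec.2.2.2

-- A's loop result: count of lucky elements and the list of additions, in order
theorem foldl_loop_eq (arr : List Int) (k : Int) :
    arr.foldl (fun (s : Int × List Int) x =>
      if PySem.Int.mod x k = 0 then (s.1 + 1, s.2)
      else (s.1, s.2 ++ [k - PySem.Int.mod x k])) (0, [])
    = ((arr.countP (fun x => decide (PySem.Int.mod x k = 0)) : Int),
       (arr.filter (fun x => !decide (PySem.Int.mod x k = 0))).map (fun x => k - PySem.Int.mod x k)) := by
  have hfun : (fun (s : Int × List Int) x =>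
      if PySem.Int.mod x k = 0 then (s.1 + 1, s.2)
      else (s.1, s.2 ++ [k - PySem.Int.mod x k]))
      = (fun (s : Int × List Int) x =>
        ((if decide (PySem.Int.mod x k = 0) then s.1 + 1 else s.1),
         (if !decide (PySem.Int.mod x k = 0) then s.2 ++ [k - PySem.Int.mod x k] else s.2))) := by
    funext s x
    by_cases h : PySem.Int.mod x k = 0 <;> simp [h]
  rw [hfun, PySem.List.foldl_prod_mk
    (f := fun (a : Int) x => if decide (PySem.Int.mod x k = 0) then a + 1 else a)
    (g := fun (b : List Int) x => if !decide (PySem.Int.mod x k = 0) then b ++ [k - PySem.Int.mod x k] else b)]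
  rw [PySem.List.foldl_if_add_one, PySem.List.foldl_append_if]
  simp

-- cost formula for 0 < k: (-x) % k is 0 for lucky x and k - x % k otherwise
theorem cost_eq (k x : Int) (hk : 0 < k) :
    PySem.Int.mod (-x) k = if PySem.Int.mod x k = 0 then 0 else k - PySem.Int.mod x k := by
  rw [PySem.Int.mod_eq_emod_of_pos hk, PySem.Int.mod_eq_emod_of_pos hk, Int.neg_emod]
  have hd : x % k = 0 ↔ k ∣ x := PySem.Int.emod_eq_zero_iff_dvd x k
  have hn : (k.natAbs : Int) = k := Int.natAbs_of_nonneg (by omega)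
  by_cases h : k ∣ x
  · simp [h, hd.mpr h]
  · rw [if_neg h, if_neg (fun hc => h (hd.mp hc)), hn]

-- sorted costs decompose as the lucky zeros first, then the sorted additions
theorem sorted_costs_eq (arr : List Int) (k : Int) (hk : 0 < k) :
    PySem.List.sorted (arr.map (fun x => PySem.Int.mod (-x) k)) (fun x => x) false
    = List.replicate (arr.countP (fun x => decide (PySem.Int.mod x k = 0))) 0
      ++ PySem.List.sorted ((arr.filter (fun x => !decide (PySem.Int.mod x k = 0))).map (fun x => k - PySem.Int.mod x k)) (fun x => x) false := by
  apply PySem.List.sorted_id_eq_of_perm_of_pairwise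
  · have h1 : (arr.filter (fun x => decide (PySem.Int.mod x k = 0))
        ++ arr.filter (fun x => !decide (PySem.Int.mod x k = 0))).Perm arr :=
      List.filter_append_perm _ arr
    have h2 := (h1.map (fun x => PySem.Int.mod (-x) k)).symm
    rw [List.map_append] at h2
    have e1 : (arr.filter (fun x => decide (PySem.Int.mod x k = 0))).map (fun x => PySem.Int.mod (-x) k)
        = List.replicate (arr.countP (fun x => decide (PySem.Int.mod x k = 0))) 0 := by
      rw [List.eq_replicate_iff]
      constructor
      · rw [List.length_map, List.countP_eq_length_filter]
      · intro b hb
        obtain ⟨x, hx, hbx⟩ := List.mem_map.mp hb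
        have hq : PySem.Int.mod x k = 0 := by simpa using List.of_mem_filter hx
        rw [← hbx, cost_eq k x hk, if_pos hq]
    have e2 : (arr.filter (fun x => !decide (PySem.Int.mod x k = 0))).map (fun x => PySem.Int.mod (-x) k)
        = (arr.filter (fun x => !decide (PySem.Int.mod x k = 0))).map (fun x => k - PySem.Int.mod x k) := by
      apply List.map_congr_left
      intro x hx
      have hq : ¬ PySem.Int.mod x k = 0 := by simpa using List.of_mem_filter hx
      rw [cost_eq k x hk, if_neg hq]
    rw [e1, e2] at h2
    refine List.Perm.trans ?_ h2.symm
    exact List.Perm.append_left _ (PySem.List.sorted_perm _ _ _)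
  · rw [List.pairwise_append]
    refine ⟨List.pairwise_replicate.mpr (Or.inr le_rfl), PySem.List.sorted_pairwise _ _, ?_⟩
    intro a ha b hb
    have ha' : a = 0 := List.eq_of_mem_replicate ha
    have hb' : 0 < b := by
      have hmem := (PySem.List.mem_sorted _ _ _ _).mp hb
      obtain ⟨x, hx, hbx⟩ := List.mem_map.mp hmem
      have := PySem.Int.mod_lt x hk
      omega
    omega

-- ===== VERDICT (by name: the statement is the Claim_ definition above) =====
theorem minSoldiers_spec : Claim_equal_minSoldiers := by
  intro arr k _ hk
  have hk' : 0 < k := hk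
  show minSoldiers arr k = minSoldiers_alt arr k
  rw [alt_eq_take arr k hk']
  unfold minSoldiers
  rw [foldl_loop_eq, sorted_costs_eq arr k hk']
  dsimp only
  set L := arr.countP (fun x => decide (PySem.Int.mod x k = 0)) with hL
  set need : Int := (((arr.length + 1) / 2 : Nat) : Int) with hneed
  set sortedAdd := PySem.List.sorted
    ((arr.filter (fun x => !decide (PySem.Int.mod x k = 0))).map (fun x => k - PySem.Int.mod x k))
    (fun x => x) false with hsa
  have hneednn : 0 ≤ need := by omega
  rw [List.take_append, List.take_replicate, List.sum_append, List.sum_replicate,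
    List.length_replicate, smul_zero, zero_add]
  split
  · next h =>
    have e : need.toNat - L = 0 := by omega
    rw [e]
    simp
  · next h =>
    rw [PySem.List.slice_to sortedAdd (show (0:Int) ≤ need - (L:Int) by omega)]
    have e : (need - (L : Int)).toNat = need.toNat - L := by omega
    rw [e]
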